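-- pv_equiv track=rewrite | github.com/donghaozhang/Leetcode_play | leetcode_questions/string_processing/zero_substrings/zero_substrings.py | count_zero_substrings
-- ===== SOURCE A (Python) =====
-- def count_zero_substrings(s):
--     """
--     计算字符串中全零子串的个数
--     :param s: str，输入字符串（只包含'0'和'1'）
--     :return: int，全零子串的个数
--     """
--     if not s:
--         return 0
--
--     count = 0
--     current_zeros = 0
--
--     # 遍历字符串，统计连续的0
--     for char in s:
--         if char == '0':
--             current_zeros += 1
--             # 每增加一个0，就会产生current_zeros个新的全零子串
--             count += current_zeros
--         else:
--             current_zeros = 0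
--
--     return count
-- ===== SOURCE B (Python) =====
-- def count_zero_substrings(s):
--     total = 0
--     i = 0
--     n = len(s)
--     while i < n:
--         if s[i] == '0':
--             j = i
--             while j < n and s[j] == '0':
--                 j += 1
--             k = j - i
--             total += k * (k + 1) // 2
--             i = j
--         else:
--             i += 1
--     return total
-- ===== Notes on version B (the rewrite author's own statement) =====
-- stated objective: alternative
-- what changed: B scans maximal runs of consecutive zero characters and adds the closed-form count k*(k+1)//2 per run, instead of A's per-character accumulator that adds the growing run length at every zero.
import Mathlib
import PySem

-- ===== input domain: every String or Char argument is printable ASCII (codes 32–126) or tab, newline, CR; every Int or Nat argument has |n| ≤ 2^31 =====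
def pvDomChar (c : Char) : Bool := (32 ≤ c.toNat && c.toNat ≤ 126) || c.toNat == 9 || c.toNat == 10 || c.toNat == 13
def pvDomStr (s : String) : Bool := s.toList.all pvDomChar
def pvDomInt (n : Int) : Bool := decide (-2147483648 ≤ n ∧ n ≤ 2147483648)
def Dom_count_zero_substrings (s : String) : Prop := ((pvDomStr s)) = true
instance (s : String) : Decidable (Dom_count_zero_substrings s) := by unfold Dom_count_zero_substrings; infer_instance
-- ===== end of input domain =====

-- B replaces A's per-character accumulator with a run-length scan adding k*(k+1)//2 per maximal zero run (alternative decomposition, same cost).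

-- ===== PORT A =====
-- for char in s: if char=='0': cz+=1; count+=cz else cz=0; state = (count, current_zeros)
def count_zero_substrings (s : String) : Int :=
  if s.toList = [] then 0
  else
    (s.toList.foldl
      (fun (st : Int × Int) (c : Char) =>
        if c = '0' then (st.1 + (st.2 + 1), st.2 + 1) else (st.1, 0))
      (0, 0)).1

-- ===== PORT B =====
-- inner while: consume the maximal zero run starting at i (takeWhile/dropWhile), add k*(k+1)//2
def czAltGo (l : List Char) : Int :=
  match l with
  | [] => 0
  | c :: r =>
    if c = '0' then
      let k : Int := ((r.takeWhile (fun x => x = '0')).length : Int) + 1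
      PySem.Int.floordiv (k * (k + 1)) 2 + czAltGo (r.dropWhile (fun x => x = '0'))
    else
      czAltGo r
termination_by l.length
decreasing_by
  · simpa using Nat.lt_succ_of_le (List.length_dropWhile_le _ _)
  · simp

def count_zero_substrings_alt (s : String) : Int := czAltGo s.toList

-- ===== PRECONDITION & SPEC =====
def Spec_count_zero_substrings (s : String) (out : Int) : Prop := out = count_zero_substrings_alt s
instance (s : String) (out : Int) : Decidable (Spec_count_zero_substrings s out) := by unfold Spec_count_zero_substrings; infer_instance

-- ===== CLAIM (what is proved, stated in full; the proofs are below) =====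
def Claim_equal_count_zero_substrings : Prop := ∀ (s : String), Dom_count_zero_substrings s → Spec_count_zero_substrings s (count_zero_substrings s)

-- ===== LEMMAS AND PROOFS =====

-- proof-side characterisation of A's loop: added count from state with current_zeros = cz
def czG (l : List Char) (cz : Int) : Int :=
  match l with
  | [] => 0
  | c :: r => if c = '0' then (cz + 1) + czG r (cz + 1) else czG r 0

-- triangle number
def czT (n : Int) : Int := n * (n + 1) / 2

lemma czT_step (n : Int) : czT (n + 1) = czT n + (n + 1) := by
  unfold czT
  have h : (n + 1) * (n + 1 + 1) = n * (n + 1) + 2 * (n + 1) := by ring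
  rw [h]
  omega

lemma foldA_fst (l : List Char) (count cz : Int) :
    (l.foldl (fun (st : Int × Int) (c : Char) =>
        if c = '0' then (st.1 + (st.2 + 1), st.2 + 1) else (st.1, 0)) (count, cz)).1
      = count + czG l cz := by
  induction l generalizing count cz with
  | nil => simp [czG]
  | cons c r ih =>
    by_cases hc : c = '0'
    · simp [czG, hc, List.foldl_cons, ih]; ring
    · simp [czG, hc, List.foldl_cons, ih]

lemma czG_split (l : List Char) (cz : Int) :
    czG l cz = czT (cz + ((l.takeWhile (fun x => x = '0')).length : Int)) - czT cz
               + czG (l.dropWhile (fun x => x = '0')) 0 := by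
  induction l generalizing cz with
  | nil => simp [czG]
  | cons c r ih =>
    by_cases hc : c = '0'
    · simp only [czG, hc, List.takeWhile, List.dropWhile, decide_true, List.length_cons]
      rw [ih (cz + 1)]
      push_cast
      have harg : cz + (((r.takeWhile (fun x => x = '0')).length : Int) + 1)
          = (cz + 1) + ((r.takeWhile (fun x => x = '0')).length : Int) := by ring
      rw [harg]
      have hT := czT_step cz
      omega
    · simp only [czG, hc, List.takeWhile, List.dropWhile]
      simp [hc, czG]

lemma czAltGo_eq_aux (n : Nat) : ∀ l : List Char, l.length ≤ n → czAltGo l = czG l 0 := by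
  induction n with
  | zero =>
    intro l hl
    have hnil : l = [] := List.length_eq_zero_iff.mp (Nat.le_zero.mp hl)
    simp [hnil, czAltGo, czG]
  | succ n ih =>
    intro l hl
    match l with
    | [] => simp [czAltGo, czG]
    | c :: r =>
      by_cases hc : c = '0'
      · subst hc
        simp only [czAltGo, czG, zero_add]
        rw [czG_split r 1]
        have hlen : (r.dropWhile (fun x => x = '0')).length ≤ n :=
          le_trans (List.length_dropWhile_le _ _)
            (Nat.le_of_succ_le_succ (by simpa using hl))
        rw [ih _ hlen]
        rw [PySem.Int.floordiv_eq_ediv_of_pos (by norm_num)]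
        set m : Int := ((r.takeWhile (fun x => x = '0')).length : Int) with hm
        have h1m : (1:Int) + m = m + 1 := by ring
        rw [h1m]
        unfold czT
        generalize (m + 1) * (m + 1 + 1) = p
        norm_num
        omega
      · rw [czAltGo, if_neg hc, czG, if_neg hc]
        exact ih r (Nat.le_of_succ_le_succ (by simpa using hl))

lemma czAltGo_eq_czG (l : List Char) : czAltGo l = czG l 0 :=
  czAltGo_eq_aux l.length l le_rfl

-- ===== VERDICT (by name: the statement is the Claim_ definition above) =====
theorem count_zero_substrings_spec : Claim_equal_count_zero_substrings := by
  intro s _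
  unfold Spec_count_zero_substrings count_zero_substrings count_zero_substrings_alt
  rw [czAltGo_eq_czG]
  by_cases h : s.toList = []
  · simp [h, czG]
  · rw [if_neg h, foldA_fst]
    ring
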